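-- pv_equiv track=rewrite | github.com/YoungHo-K/problem-solving | 프로그래머스/lv3/86053. 금과 은 운반하기/금과 은 운반하기.py | solution
-- ===== SOURCE A (Python) =====
-- def solution(a, b, g, s, w, t):
--     left, right = 0, int(10 ** 16)
--
--     while left <= right:
--         middle = (left + right) // 2
--         total, num_gold, num_silver = 0, 0, 0
--
--         for gold, silver, weight, time in zip(g, s, w, t):
--             move = middle // (time * 2)
--             if middle % (time * 2) >= time:
--                 move += 1
--
--             num_gold += weight * move if weight * move < gold else gold
--             num_silver += weight * move if weight * move < silver else silver
--             total += weight * move if weight * move < gold + silver else gold + silver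
--
--         if (num_gold >= a) and (num_silver >= b) and (total >= a + b):
--             right = middle - 1
--         else:
--             left = middle + 1
--
--     return left
-- ===== SOURCE B (Python) =====
-- def solution(a, b, g, s, w, t):
--     routes = list(zip(g, s, w, t))
--
--     def feasible(m):
--         gold = silver = both = 0
--         for gi, si, wi, ti in routes:
--             carried = wi * ((m + ti) // (2 * ti))
--             gold += min(carried, gi)
--             silver += min(carried, si)
--             both += min(carried, gi + si)
--         return gold >= a and silver >= b and both >= a + b
--
--     def search(lo, hi):
--         # least m in [lo, hi) with feasible(m), else hi
--         if lo >= hi: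
--             return lo
--         mid = (lo + hi - 1) // 2
--         return search(lo, mid) if feasible(mid) else search(mid + 1, hi)
--
--     return search(0, 10 ** 16 + 1)
-- ===== Notes on version B (the rewrite author's own statement) =====
-- stated objective: alternative
-- what changed: Replaces A's closed-interval iterative binary search with inline sums and mod-based arrival correction by a recursive half-open search over a separate feasibility predicate that counts arrivals with the closed form (m+t)//(2t) and caps loads with min().
-- outside the precondition, e.g. on solution(-3, -3, [0], [0], [-4], [-1]): A returns 1, B returns 0; on solution(1, 1, [5], [5], [3], [-2]): A returns 10000000000000001, B returns 10000000000000001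
import Mathlib
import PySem

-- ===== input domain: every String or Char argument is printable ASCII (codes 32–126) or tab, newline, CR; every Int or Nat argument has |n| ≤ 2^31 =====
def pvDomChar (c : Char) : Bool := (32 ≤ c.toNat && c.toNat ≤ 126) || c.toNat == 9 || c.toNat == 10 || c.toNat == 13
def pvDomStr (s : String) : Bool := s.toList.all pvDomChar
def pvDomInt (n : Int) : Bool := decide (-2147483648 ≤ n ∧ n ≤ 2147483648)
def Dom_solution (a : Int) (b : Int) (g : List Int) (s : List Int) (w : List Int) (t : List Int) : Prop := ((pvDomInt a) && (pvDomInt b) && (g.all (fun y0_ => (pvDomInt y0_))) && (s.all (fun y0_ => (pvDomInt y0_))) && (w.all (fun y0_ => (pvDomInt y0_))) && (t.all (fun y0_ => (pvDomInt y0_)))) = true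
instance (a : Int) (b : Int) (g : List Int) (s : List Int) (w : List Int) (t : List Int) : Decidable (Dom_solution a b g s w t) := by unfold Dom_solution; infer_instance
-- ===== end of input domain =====

-- B replaces A's closed-interval iterative binary search with inline sums and
-- mod-based arrival correction by a recursive half-open search over a separate
-- feasibility predicate using the closed-form arrival count (m+t)//(2t) and min();
-- objective: alternative decomposition.

-- ===== PORT A =====
-- termination measures of the two searches (cited by name in decreasing_by)
lemma midDecrA1 (l r : Int) (h : l ≤ r) :
    (PySem.Int.floordiv (l + r) 2 - 1 + 1 - l).toNat < (r + 1 - l).toNat := by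
  have hb := PySem.Int.floordiv_two_mid_bounds h
  rw [Int.sub_add_cancel]
  exact (Int.toNat_lt_toNat (sub_pos.mpr (lt_of_le_of_lt h (lt_add_one r)))).mpr
    (sub_lt_sub_right (lt_of_le_of_lt hb.2 (lt_add_one r)) l)
lemma midDecrA2 (l r : Int) (h : l ≤ r) :
    (r + 1 - (PySem.Int.floordiv (l + r) 2 + 1)).toNat < (r + 1 - l).toNat := by
  have hb := PySem.Int.floordiv_two_mid_bounds h
  exact (Int.toNat_lt_toNat (sub_pos.mpr (lt_of_le_of_lt h (lt_add_one r)))).mpr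
    (sub_lt_sub_left (lt_of_le_of_lt hb.1 (lt_add_one _)) (r + 1))
lemma midDecrB1 (lo hi : Int) (h : lo < hi) :
    (PySem.Int.floordiv (lo + hi - 1) 2 - lo).toNat < (hi - lo).toNat := by
  have hb := PySem.Int.floordiv_two_mid_bounds (by exact Int.le_sub_one_of_lt h)
  rw [add_sub_assoc]
  exact (Int.toNat_lt_toNat (sub_pos.mpr h)).mpr
    (sub_lt_sub_right (lt_of_le_of_lt hb.2 (sub_one_lt hi)) lo)
lemma midDecrB2 (lo hi : Int) (h : lo < hi) :
    (hi - (PySem.Int.floordiv (lo + hi - 1) 2 + 1)).toNat < (hi - lo).toNat := by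
  have hb := PySem.Int.floordiv_two_mid_bounds (by exact Int.le_sub_one_of_lt h)
  rw [add_sub_assoc]
  exact (Int.toNat_lt_toNat (sub_pos.mpr h)).mpr
    (sub_lt_sub_left (lt_of_le_of_lt hb.1 (lt_add_one _)) hi)

-- the while loop of A: closed interval [left, right], inline accumulation of
-- (total, num_gold, num_silver) over zip(g, s, w, t)
def solGoA (a : Int) (b : Int) (g : List Int) (s : List Int) (w : List Int) (t : List Int)
    (left : Int) (right : Int) : Int :=
  if _h : left ≤ right then
    let middle := PySem.Int.floordiv (left + right) 2
    let acc := (g.zip (s.zip (w.zip t))).foldl (fun (acc : Int × Int × Int) (r : Int × Int × Int × Int) =>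
      let move := PySem.Int.floordiv middle (r.2.2.2 * 2)
      let move := if r.2.2.2 ≤ PySem.Int.mod middle (r.2.2.2 * 2) then move + 1 else move
      (acc.1 + (if r.2.2.1 * move < r.1 + r.2.1 then r.2.2.1 * move else r.1 + r.2.1),
       acc.2.1 + (if r.2.2.1 * move < r.1 then r.2.2.1 * move else r.1),
       acc.2.2 + (if r.2.2.1 * move < r.2.1 then r.2.2.1 * move else r.2.1))) (0, 0, 0)
    if a ≤ acc.2.1 ∧ b ≤ acc.2.2 ∧ a + b ≤ acc.1 then
      solGoA a b g s w t left (middle - 1)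
    else
      solGoA a b g s w t (middle + 1) right
  else left
termination_by (right + 1 - left).toNat
decreasing_by
  · exact midDecrA1 left right _h
  · exact midDecrA2 left right _h

def solution (a : Int) (b : Int) (g : List Int) (s : List Int) (w : List Int) (t : List Int) : Int :=
  solGoA a b g s w t 0 10000000000000000

-- ===== PORT B =====
-- feasibility of a candidate time m (the routes are zip(g, s, w, t))
def feasB (a : Int) (b : Int) (routes : List (Int × Int × Int × Int)) (m : Int) : Bool :=
  let acc := routes.foldl (fun (acc : Int × Int × Int) (r : Int × Int × Int × Int) =>
    let carried := r.2.2.1 * PySem.Int.floordiv (m + r.2.2.2) (2 * r.2.2.2)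
    (acc.1 + min carried r.1, acc.2.1 + min carried r.2.1, acc.2.2 + min carried (r.1 + r.2.1))) (0, 0, 0)
  decide (a ≤ acc.1 ∧ b ≤ acc.2.1 ∧ a + b ≤ acc.2.2)

-- least m in [lo, hi) with f m = true, else hi
def searchB (f : Int → Bool) (lo : Int) (hi : Int) : Int :=
  if _h : lo < hi then
    let mid := PySem.Int.floordiv (lo + hi - 1) 2
    if f mid then searchB f lo mid else searchB f (mid + 1) hi
  else lo
termination_by (hi - lo).toNat
decreasing_by
  · exact midDecrB1 lo hi _h
  · exact midDecrB2 lo hi _h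

def solution_alt (a : Int) (b : Int) (g : List Int) (s : List Int) (w : List Int) (t : List Int) : Int :=
  let routes := g.zip (s.zip (w.zip t))
  searchB (feasB a b routes) 0 (10000000000000000 + 1)

-- ===== PRECONDITION & SPEC =====
-- Pre_ excludes inputs where some used route has time ≤ 0: at time 0 A raises
-- ZeroDivisionError (so does B), and for a negative time the number of arrivals by
-- time m is ambiguous, A's mod-based rounding and B's closed form legitimately
-- disagree on that meaningless corner.
def Pre_solution (a : Int) (b : Int) (g : List Int) (s : List Int) (w : List Int) (t : List Int) : Prop :=
  ∀ r ∈ g.zip (s.zip (w.zip t)), 1 ≤ r.2.2.2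
instance (a : Int) (b : Int) (g : List Int) (s : List Int) (w : List Int) (t : List Int) : Decidable (Pre_solution a b g s w t) := by unfold Pre_solution; infer_instance

def pvWitness_solution : Int × Int × List Int × List Int × List Int × List Int :=
  (10, 10, [100], [100], [7], [10])

def Spec_solution (a : Int) (b : Int) (g : List Int) (s : List Int) (w : List Int) (t : List Int) (out : Int) : Prop := out = solution_alt a b g s w t
instance (a : Int) (b : Int) (g : List Int) (s : List Int) (w : List Int) (t : List Int) (out : Int) : Decidable (Spec_solution a b g s w t out) := by unfold Spec_solution; infer_instance

-- ===== CLAIM (what is proved, stated in full; the proofs are below) =====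
def Claim_equal_solution : Prop := ∀ (a : Int) (b : Int) (g : List Int) (s : List Int) (w : List Int) (t : List Int), Dom_solution a b g s w t → Pre_solution a b g s w t → Spec_solution a b g s w t (solution a b g s w t)

-- ===== LEMMAS AND PROOFS =====

-- named copies of the two loop bodies (definitionally equal to the lambdas in the ports)
def stepA (middle : Int) (acc : Int × Int × Int) (r : Int × Int × Int × Int) : Int × Int × Int :=
  let move := PySem.Int.floordiv middle (r.2.2.2 * 2)
  let move := if r.2.2.2 ≤ PySem.Int.mod middle (r.2.2.2 * 2) then move + 1 else move
  (acc.1 + (if r.2.2.1 * move < r.1 + r.2.1 then r.2.2.1 * move else r.1 + r.2.1),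
   acc.2.1 + (if r.2.2.1 * move < r.1 then r.2.2.1 * move else r.1),
   acc.2.2 + (if r.2.2.1 * move < r.2.1 then r.2.2.1 * move else r.2.1))

def stepB (m : Int) (acc : Int × Int × Int) (r : Int × Int × Int × Int) : Int × Int × Int :=
  let carried := r.2.2.1 * PySem.Int.floordiv (m + r.2.2.2) (2 * r.2.2.2)
  (acc.1 + min carried r.1, acc.2.1 + min carried r.2.1, acc.2.2 + min carried (r.1 + r.2.1))

-- A's per-step feasibility condition, as a Bool (defeq to solGoA's loop condition)
def fA (a : Int) (b : Int) (g : List Int) (s : List Int) (w : List Int) (t : List Int) (middle : Int) : Bool :=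
  let acc := (g.zip (s.zip (w.zip t))).foldl (stepA middle) (0, 0, 0)
  decide (a ≤ acc.2.1 ∧ b ≤ acc.2.2 ∧ a + b ≤ acc.1)

lemma feasB_eq (a b : Int) (routes : List (Int × Int × Int × Int)) (m : Int) :
    feasB a b routes m
      = (let acc := routes.foldl (stepB m) (0, 0, 0)
         decide (a ≤ acc.1 ∧ b ≤ acc.2.1 ∧ a + b ≤ acc.2.2)) := rfl

-- Python's move computation equals the closed form (m + t) // (2t) for t ≥ 1
lemma moveEq (m tt : Int) (ht : 1 ≤ tt) :
    (if tt ≤ PySem.Int.mod m (tt * 2) then PySem.Int.floordiv m (tt * 2) + 1 else PySem.Int.floordiv m (tt * 2))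
      = PySem.Int.floordiv (m + tt) (2 * tt) := by
  have hd : (0 : Int) < tt * 2 := by omega
  have hd' : (0 : Int) < 2 * tt := by omega
  rw [PySem.Int.floordiv_eq_ediv_of_pos hd, PySem.Int.floordiv_eq_ediv_of_pos hd',
    PySem.Int.mod_eq_emod_of_pos hd]
  have h1 := Int.ediv_add_emod m (tt * 2)
  have h2 := Int.emod_nonneg m (by omega : tt * 2 ≠ 0)
  have h3 := Int.emod_lt_of_pos m hd
  set q := m / (tt * 2) with hq
  set r := m % (tt * 2) with hr
  by_cases hc : tt ≤ r
  · have hmt : m + tt = (r - tt) + (q + 1) * (2 * tt) := by linarith [h1]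
    rw [hmt, Int.add_mul_ediv_right _ _ (by omega : (2 : Int) * tt ≠ 0)]
    rw [Int.ediv_eq_zero_of_lt (by omega) (by omega)]
    simp [hc]
  · have hmt : m + tt = (r + tt) + q * (2 * tt) := by linarith [h1]
    rw [hmt, Int.add_mul_ediv_right _ _ (by omega : (2 : Int) * tt ≠ 0)]
    rw [Int.ediv_eq_zero_of_lt (by omega) (by omega)]
    simp [hc]

lemma ifLtMin (x c : Int) : (if x < c then x else c) = min x c := by
  rw [min_def]; split_ifs <;> omega

-- each step of A equals the corresponding step of B up to the cyclic permutation
-- (total, gold, silver) vs (gold, silver, both)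
lemma stepAB_eq (m : Int) (r : Int × Int × Int × Int) (ht : 1 ≤ r.2.2.2) (T G S : Int) :
    stepA m (T, G, S) r = ((stepB m (G, S, T) r).2.2, (stepB m (G, S, T) r).1, (stepB m (G, S, T) r).2.1) := by
  obtain ⟨g1, s1, w1, t1⟩ := r
  simp only at ht
  unfold stepA stepB
  simp only
  rw [moveEq m t1 ht, ifLtMin, ifLtMin, ifLtMin]

-- A's fold equals B's fold up to the cyclic permutation of the accumulator
lemma foldAB_eq (m : Int) : ∀ (routes : List (Int × Int × Int × Int)),
    (∀ r ∈ routes, 1 ≤ r.2.2.2) → ∀ T G S : Int,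
    routes.foldl (stepA m) (T, G, S)
      = ((routes.foldl (stepB m) (G, S, T)).2.2,
         (routes.foldl (stepB m) (G, S, T)).1,
         (routes.foldl (stepB m) (G, S, T)).2.1) := by
  intro routes
  induction routes with
  | nil => intro _ T G S; simp
  | cons r rs ih =>
    intro hts T G S
    simp only [List.foldl_cons]
    rw [stepAB_eq m r (hts r (List.mem_cons_self ..)) T G S]
    have hsb : stepB m (G, S, T) r
        = ((stepB m (G, S, T) r).1, (stepB m (G, S, T) r).2.1, (stepB m (G, S, T) r).2.2) := rfl
    rw [hsb]
    exact ih (fun r hr => hts r (List.mem_cons_of_mem _ hr)) _ _ _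

-- under Pre_ the two feasibility predicates agree
lemma fA_eq_feasB (a b : Int) (g s w t : List Int)
    (hpre : ∀ r ∈ g.zip (s.zip (w.zip t)), 1 ≤ r.2.2.2) (m : Int) :
    fA a b g s w t m = feasB a b (g.zip (s.zip (w.zip t))) m := by
  rw [feasB_eq]
  unfold fA
  rw [foldAB_eq m _ hpre 0 0 0]

-- the two searches probe the same midpoints: A on the closed interval [l, r],
-- B on the half-open [l, r+1) with mid = (lo + hi - 1) // 2 = (l + r) // 2
lemma solGoA_eq_searchB (a b : Int) (g s w t : List Int) :
    ∀ n (l r : Int), (r + 1 - l).toNat = n →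
    solGoA a b g s w t l r = searchB (fA a b g s w t) l (r + 1) := by
  intro n
  induction n using Nat.strong_induction_on with
  | _ n ih =>
    intro l r hn
    rw [solGoA, searchB]
    by_cases hlr : l ≤ r
    · rw [dif_pos hlr, dif_pos (by omega : l < r + 1)]
      rw [show l + (r + 1) - 1 = l + r from by ring]
      set mid := PySem.Int.floordiv (l + r) 2 with hmiddef
      dsimp only
      split
      next hc =>
        have hfm : fA a b g s w t mid = true := decide_eq_true hc
        rw [if_pos hfm]
        have hrec := ih ((mid - 1) + 1 - l).toNat
          (by have := midDecrA1 l r hlr; omega) l (mid - 1) rfl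
        rw [Int.sub_add_cancel] at hrec
        exact hrec
      next hc =>
        have hfm : fA a b g s w t mid = false := decide_eq_false hc
        rw [if_neg (by rw [hfm]; exact Bool.false_ne_true)]
        exact ih (r + 1 - (mid + 1)).toNat
          (by have := midDecrA2 l r hlr; omega) (mid + 1) r rfl
    · rw [dif_neg hlr, dif_neg (by omega : ¬ l < r + 1)]

-- ===== VERDICT (by name: the statement is the Claim_ definition above) =====
theorem solution_spec : Claim_equal_solution := by
  intro a b g s w t _hdom hpre
  unfold Spec_solution solution solution_alt
  have h1 : solGoA a b g s w t 0 10000000000000000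
      = searchB (fA a b g s w t) 0 (10000000000000000 + 1) :=
    solGoA_eq_searchB a b g s w t _ 0 10000000000000000 rfl
  have hf : fA a b g s w t = feasB a b (g.zip (s.zip (w.zip t))) :=
    funext (fA_eq_feasB a b g s w t hpre)
  rw [h1, hf]
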